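-- pv_equiv track=rewrite | github.com/khalidkhan82/2023-python-netdevops | Abideen-ASA/refactored.py | process_static_lines
-- ===== SOURCE A (Python) =====
-- def process_static_lines(lines):
--     nat_host_list = []
--     nat_subnet_list = []
--     for line in lines:
--         if line.startswith("static"):
--             if "255.255.255.255" in line:
--                 nat_host_list.append(line.split())
--             else:
--                 nat_subnet_list.append(line.split())
--     return nat_host_list + nat_subnet_list
-- ===== SOURCE B (Python) =====
-- def process_static_lines(lines):
--     static = [line for line in lines if line.startswith("static")]
--     static.sort(key=lambda line: 0 if "255.255.255.255" in line else 1)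
--     return [line.split() for line in static]
-- ===== Notes on version B (the rewrite author's own statement) =====
-- stated objective: simpler
-- what changed: Replaces the two-accumulator bucket loop with filter + stable sort on a 0/1 mask key + split, relying on sort stability to reproduce the host-then-subnet concatenation.
import Mathlib
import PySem

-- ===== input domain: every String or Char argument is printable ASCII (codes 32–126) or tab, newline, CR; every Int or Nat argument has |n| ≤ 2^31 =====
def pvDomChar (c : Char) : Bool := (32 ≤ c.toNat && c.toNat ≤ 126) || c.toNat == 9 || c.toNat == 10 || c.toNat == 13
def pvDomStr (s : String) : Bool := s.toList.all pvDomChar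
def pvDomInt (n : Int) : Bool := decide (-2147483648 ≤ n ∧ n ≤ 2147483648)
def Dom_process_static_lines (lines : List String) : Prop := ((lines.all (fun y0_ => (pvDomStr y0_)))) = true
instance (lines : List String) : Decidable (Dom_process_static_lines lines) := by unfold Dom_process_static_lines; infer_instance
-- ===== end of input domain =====

-- B replaces A's two-bucket accumulator loop by filter + stable sort on a 0/1 mask key + split (simpler decomposition, not faster).

-- ===== PORT A =====
def process_static_lines (lines : List String) : List (List String) :=
  let st := lines.foldl
    (fun (acc : List (List String) × List (List String)) line =>
      if PySem.Str.startswith line "static" then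
        if PySem.Str.isIn "255.255.255.255" line then
          (acc.1 ++ [PySem.Str.split₀ line], acc.2)
        else
          (acc.1, acc.2 ++ [PySem.Str.split₀ line])
      else acc)
    ([], [])
  st.1 ++ st.2

-- ===== PORT B =====
def process_static_lines_alt (lines : List String) : List (List String) :=
  let static := lines.filter (fun line => PySem.Str.startswith line "static")
  let sortedStatic := PySem.List.sorted static
    (fun line => if PySem.Str.isIn "255.255.255.255" line then (0 : Int) else 1) false
  sortedStatic.map (fun line => PySem.Str.split₀ line)

-- ===== PRECONDITION & SPEC =====
def Spec_process_static_lines (lines : List String) (out : List (List String)) : Prop := out = process_static_lines_alt lines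
instance (lines : List String) (out : List (List String)) : Decidable (Spec_process_static_lines lines out) := by unfold Spec_process_static_lines; infer_instance

-- ===== CLAIM (what is proved, stated in full; the proofs are below) =====
def Claim_equal_process_static_lines : Prop := ∀ (lines : List String), Dom_process_static_lines lines → Spec_process_static_lines lines (process_static_lines lines)

-- ===== LEMMAS AND PROOFS =====

-- inserting x below every element of `as` and above every element of `bs` lands exactly between them
theorem pv_insertBy_split {α : Type} (before : α → α → Bool) (x : α)
    (as bs : List α) (ha : ∀ y ∈ as, before x y = false)
    (hb : ∀ y ∈ bs, before x y = true) :
    PySem.List.insertBy before x (as ++ bs) = as ++ x :: bs := by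
  induction as with
  | nil =>
    cases bs with
    | nil => simp [PySem.List.insertBy]
    | cons b bs' => simp [PySem.List.insertBy, hb b (by simp)]
  | cons a as' ih =>
    simp [PySem.List.insertBy, ha a (by simp)]
    exact ih (fun y hy => ha y (by simp [hy]))

-- the stable insertion sort with a 0/1 key is a stable partition
theorem pv_sort_partition {α : Type} (p : α → Bool) (xs a0 a1 : List α)
    (h0 : ∀ y ∈ a0, p y = true) (h1 : ∀ y ∈ a1, p y = false) :
    xs.foldl (fun acc x => PySem.List.insertBy
        (fun a b => decide ((if p a then (0 : Int) else 1) < (if p b then (0 : Int) else 1))) x acc)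
      (a0 ++ a1)
      = (a0 ++ xs.filter p) ++ (a1 ++ xs.filter (fun x => !p x)) := by
  induction xs generalizing a0 a1 with
  | nil => simp
  | cons x rest ih =>
    by_cases hx : p x = true
    · have hins : PySem.List.insertBy
          (fun a b => decide ((if p a then (0 : Int) else 1) < (if p b then (0 : Int) else 1))) x (a0 ++ a1)
          = (a0 ++ [x]) ++ a1 := by
        rw [pv_insertBy_split]
        · simp
        · intro y hy; simp [hx, h0 y hy]
        · intro y hy; simp [hx, h1 y hy]
      have h0' : ∀ y ∈ a0 ++ [x], p y = true := by
        intro y hy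
        rcases List.mem_append.mp hy with h | h
        · exact h0 y h
        · simp at h; subst h; exact hx
      simp only [List.foldl_cons, hins]
      rw [ih (a0 ++ [x]) a1 h0' h1]
      simp [hx]
    · have hx' : p x = false := by simpa using hx
      have hins : PySem.List.insertBy
          (fun a b => decide ((if p a then (0 : Int) else 1) < (if p b then (0 : Int) else 1))) x (a0 ++ a1)
          = a0 ++ (a1 ++ [x]) := by
        have hfalse : ∀ y ∈ a0 ++ a1,
            (fun a b => decide ((if p a then (0 : Int) else 1) < (if p b then (0 : Int) else 1))) x y = false := by
          intro y hy
          rcases List.mem_append.mp hy with h | h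
          · simp [hx', h0 y h]
          · simp [hx', h1 y h]
        have h := pv_insertBy_split (fun a b => decide ((if p a then (0 : Int) else 1) < (if p b then (0 : Int) else 1))) x (a0 ++ a1) [] hfalse (by intro y hy; simp at hy)
        simpa [List.append_assoc] using h
      have h1' : ∀ y ∈ a1 ++ [x], p y = false := by
        intro y hy
        rcases List.mem_append.mp hy with h | h
        · exact h1 y h
        · simp at h; subst h; exact hx'
      simp only [List.foldl_cons, hins]
      rw [ih a0 (a1 ++ [x]) h0 h1']
      simp [hx']

-- A's two accumulators collect exactly the split host lines and split subnet lines, in order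
theorem pv_foldl_buckets {α β : Type} (q p : α → Bool) (f : α → β)
    (xs : List α) (acc : List β × List β) :
    xs.foldl
      (fun (acc : List β × List β) line =>
        if q line then
          if p line then (acc.1 ++ [f line], acc.2)
          else (acc.1, acc.2 ++ [f line])
        else acc) acc
    = (acc.1 ++ (((xs.filter q).filter p).map f),
       acc.2 ++ (((xs.filter q).filter (fun line => !p line)).map f)) := by
  induction xs generalizing acc with
  | nil => simp
  | cons x rest ih =>
    by_cases hq : q x = true
    · by_cases hp : p x = true
      · simp only [List.foldl_cons, hq, hp, if_pos rfl]
        rw [ih]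
        simp [hq, hp]
      · have hp' : p x = false := by simpa using hp
        simp only [List.foldl_cons, hq, hp', Bool.false_eq_true, if_pos rfl, if_false]
        rw [ih]
        simp [hq, hp']
    · have hq' : q x = false := by simpa using hq
      simp only [List.foldl_cons, hq', Bool.false_eq_true, if_false]
      rw [ih]
      simp [hq']

-- ===== VERDICT (by name: the statement is the Claim_ definition above) =====
theorem process_static_lines_spec : Claim_equal_process_static_lines := by
  intro lines _
  unfold Spec_process_static_lines process_static_lines process_static_lines_alt
  simp only []
  rw [PySem.List.sorted_eq_foldl_insertBy]
  rw [pv_foldl_buckets (fun line => PySem.Str.startswith line "static")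
        (fun line => PySem.Str.isIn "255.255.255.255" line)
        (fun line => PySem.Str.split₀ line) lines ([], [])]
  have hpart := pv_sort_partition (fun line => PySem.Str.isIn "255.255.255.255" line)
    (lines.filter (fun line => PySem.Str.startswith line "static")) [] []
    (by intro y hy; simp at hy) (by intro y hy; simp at hy)
  simp only [List.nil_append] at hpart
  rw [hpart]
  simp only [List.map_append, List.nil_append]
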